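-- pv_equiv track=rewrite | github.com/JD-AI-Research-NLP/CUSTOM | PGNet/run/highlight.py | highlight_processer
-- ===== SOURCE A (Python) =====
-- import functools
--
-- class Pos():
--     def __init__(self, start, end):
--         self.start = start
--         self.end = end
--
-- def combin_array(steps, new_steps, pointer, target):
--     if pointer + 1 == len(steps):
--         new_steps.append(target)
--         return
--     next_ = steps[pointer + 1]
--     if (next_.start <= target.end):
--         target.end = max(next_.end, target.end)
--         combin_array(steps, new_steps, pointer + 1, target)
--     else:
--         new_steps.append(target)
--         combin_array(steps, new_steps, pointer + 1, next_)
--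
-- def highlight_processer(text, sps):
--     steps = []
--     for sp in sps:
--         sp = sp.strip()
--         pos = text.find(sp)
--         while (pos > -1):
--             pos_ = Pos(pos, pos + len(sp))
--             steps.append(pos_)
--             pos = text.find(sp, pos + len(sp))
--     if len(steps) == 0:
--         return text
--
--     def cmp(a, b):
--         if a.start > b.start:
--             return 1
--         elif a.start < b.start:
--             return -1
--         else:
--             return 0
--
--     res = sorted(steps, key=functools.cmp_to_key(cmp))
--     newSteps = []
--     combin_array(res, newSteps, 0, res[0])
--     result = []
--     begin = 0
--     for i in newSteps:
--         result.append(text[begin: i.start])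
--         result.append("<strong>")
--         result.append(text[i.start: i.end])
--         result.append("</strong>")
--         begin = i.end
--     result.append(text[begin: len(text)])
--     return ''.join(result)
-- ===== SOURCE B (Python) =====
-- def _occurrences(text, sp):
--     res = []
--     pos = text.find(sp)
--     while pos > -1:
--         res.append((pos, pos + len(sp)))
--         pos = text.find(sp, pos + len(sp))
--     return res
--
-- def highlight_processer(text, sps):
--     intervals = [iv for sp in sps for iv in _occurrences(text, sp.strip())]
--     if not intervals:
--         return text
--     intervals.sort(key=lambda iv: iv[0])
--     merged = []
--     cs, ce = intervals[0]
--     for s, e in intervals[1:]: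
--         if s <= ce:
--             ce = max(ce, e)
--         else:
--             merged.append((cs, ce))
--             cs, ce = s, e
--     merged.append((cs, ce))
--     begins = [0] + [e for _, e in merged[:-1]]
--     core = ''.join(text[b:s] + "<strong>" + text[s:e] + "</strong>"
--                    for b, (s, e) in zip(begins, merged))
--     return core + text[merged[-1][1]:]
-- ===== Notes on version B (the rewrite author's own statement) =====
-- stated objective: alternative
-- what changed: Replaces the Pos class and the recursive combin_array with flat (start,end) tuples merged by a single iterative pass, collects occurrences as a flat comprehension over a helper instead of one appended list, and renders the output by zipping each merged interval with its begin offset instead of threading a begin variable through a loop.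
import Mathlib
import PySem

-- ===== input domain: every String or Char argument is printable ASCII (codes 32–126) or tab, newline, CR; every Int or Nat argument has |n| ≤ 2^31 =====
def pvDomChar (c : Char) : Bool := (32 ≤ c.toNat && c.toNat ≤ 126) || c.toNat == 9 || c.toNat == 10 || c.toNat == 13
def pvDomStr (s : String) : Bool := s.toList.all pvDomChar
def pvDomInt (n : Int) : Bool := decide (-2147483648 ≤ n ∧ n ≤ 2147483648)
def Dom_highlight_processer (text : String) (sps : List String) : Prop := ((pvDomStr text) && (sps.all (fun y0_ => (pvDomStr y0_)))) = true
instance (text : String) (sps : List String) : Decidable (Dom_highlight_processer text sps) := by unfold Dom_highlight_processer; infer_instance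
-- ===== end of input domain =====

-- B replaces the Pos class + recursive combin_array with tuples merged in one iterative pass
-- and renders the output by zipping merged intervals with their begin offsets (alternative
-- decomposition, same cost); the return values are proved equal below.

-- ===== PORT A =====
structure APos where
  start : Int
  end_ : Int
deriving DecidableEq, Repr

-- the `while pos > -1` find loop; fuel = len(text)+1 suffices whenever sp ≠ [],
-- since pos then strictly increases and stays ≤ len(text)
def findLoopA (t sp : List Char) : Nat → Int → List APos → List APos
  | 0, _, acc => acc
  | fuel+1, pos, acc =>
    if pos > -1 then
      findLoopA t sp fuel (PySem.Chars.findFrom t sp (pos + (sp.length : Int)) none)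
        (acc ++ [⟨pos, pos + (sp.length : Int)⟩])
    else acc

def collectA (t : List Char) (sps : List String) : List APos :=
  sps.foldl (fun acc sp =>
    let sp' := PySem.Chars.strip sp.toList
    findLoopA t sp' (t.length + 1) (PySem.Chars.find t sp') acc) []

-- combin_array; new_steps.append + tail recursion rendered as the returned list.
-- The `none` branch is Python's IndexError and is unreachable from A's call (0 < len).
def combinArray (steps : List APos) (pointer : Nat) (target : APos) : List APos :=
  if pointer + 1 = steps.length then [target]
  else
    match h : steps[pointer+1]? with
    | none => [target]
    | some next =>
      if next.start ≤ target.end_ then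
        combinArray steps (pointer+1) ⟨target.start, max next.end_ target.end_⟩
      else
        target :: combinArray steps (pointer+1) next
termination_by steps.length - pointer
decreasing_by
  all_goals
    have := (List.getElem?_eq_some_iff.mp h).1
    omega

-- sorted(steps, key=cmp_to_key(cmp)) with cmp comparing only .start = stable sort keyed on start
def highlight_processer (text : String) (sps : List String) : String :=
  let t := text.toList
  let steps := collectA t sps
  if steps.length = 0 then text
  else
    let res := PySem.List.sorted steps (fun p => p.start) false
    let newSteps := combinArray res 0 (res.headD ⟨0, 0⟩)
    let st := newSteps.foldl (fun (st : List (List Char) × Int) i =>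
      (st.1 ++ [PySem.Chars.slice t (some st.2) (some i.start), "<strong>".toList,
                PySem.Chars.slice t (some i.start) (some i.end_), "</strong>".toList],
       i.end_)) ([], (0 : Int))
    String.ofList (st.1 ++ [PySem.Chars.slice t (some st.2) (some (t.length : Int))]).flatten

-- ===== PORT B =====
-- _occurrences: same find loop as A, but as a standalone helper returning its own list
def occsB (t sp : List Char) : Nat → Int → List (Int × Int) → List (Int × Int)
  | 0, _, res => res
  | fuel+1, pos, res =>
    if pos > -1 then
      occsB t sp fuel (PySem.Chars.findFrom t sp (pos + (sp.length : Int)) none)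
        (res ++ [(pos, pos + (sp.length : Int))])
    else res

def highlight_processer_alt (text : String) (sps : List String) : String :=
  let t := text.toList
  let intervals := sps.flatMap (fun sp =>
    let sp' := PySem.Chars.strip sp.toList
    occsB t sp' (t.length + 1) (PySem.Chars.find t sp') [])
  match PySem.List.sorted intervals (fun iv => iv.1) false with
  | [] => text   -- `if not intervals: return text` (sorted [] = [] only for [])
  | c0 :: rest =>
    let st := rest.foldl (fun (acc : List (Int × Int) × (Int × Int)) iv =>
      if iv.1 ≤ acc.2.2 then (acc.1, (acc.2.1, max acc.2.2 iv.2))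
      else (acc.1 ++ [acc.2], iv)) ([], c0)
    let merged := st.1 ++ [st.2]
    let begins := (0 : Int) :: (merged.dropLast.map (fun iv => iv.2))
    let core := (begins.zip merged).flatMap (fun bi =>
      PySem.Chars.slice t (some bi.1) (some bi.2.1) ++ "<strong>".toList ++
      PySem.Chars.slice t (some bi.2.1) (some bi.2.2) ++ "</strong>".toList)
    String.ofList (core ++ PySem.Chars.slice t (some ((merged.getLast?.getD (0, 0)).2)) none)

-- ===== PRECONDITION & SPEC =====
-- No Pre_: both ports are total and agree everywhere. (On inputs where some search string
-- strips to '' Python A never terminates; the ports' fuel makes them total there, and the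
-- equivalence below still holds since both use the identical find loop.)
def Spec_highlight_processer (text : String) (sps : List String) (out : String) : Prop :=
  out = highlight_processer_alt text sps
instance (text : String) (sps : List String) (out : String) :
    Decidable (Spec_highlight_processer text sps out) := by
  unfold Spec_highlight_processer; infer_instance

-- ===== CLAIM (what is proved, stated in full; the proofs are below) =====
def Claim_equal_highlight_processer : Prop :=
  ∀ (text : String) (sps : List String), Dom_highlight_processer text sps →
    Spec_highlight_processer text sps (highlight_processer text sps)


-- ===== LEMMAS AND PROOFS =====

def toPair (p : APos) : Int × Int := (p.start, p.end_)

-- the two (identical) find loops compute pair-isomorphic lists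
theorem findLoopA_occsB (t sp : List Char) :
    ∀ (fuel : Nat) (pos : Int) (acc : List APos),
      (findLoopA t sp fuel pos acc).map toPair = occsB t sp fuel pos (acc.map toPair) := by
  intro fuel
  induction fuel with
  | zero => intro pos acc; simp [findLoopA, occsB]
  | succ n ih =>
    intro pos acc
    simp only [findLoopA, occsB]
    split
    · rw [ih]; simp [toPair]
    · rfl

theorem occsB_acc (t sp : List Char) :
    ∀ (fuel : Nat) (pos : Int) (res : List (Int × Int)),
      occsB t sp fuel pos res = res ++ occsB t sp fuel pos [] := by
  intro fuel
  induction fuel with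
  | zero => intro pos res; simp [occsB]
  | succ n ih =>
    intro pos res
    simp only [occsB]
    split
    · simp only [List.nil_append]
      rw [ih, ih _ [_]]
      simp
    · simp

theorem collectA_flatMap (t : List Char) (sps : List String) :
    (collectA t sps).map toPair = sps.flatMap (fun sp =>
      let sp' := PySem.Chars.strip sp.toList
      occsB t sp' (t.length + 1) (PySem.Chars.find t sp') []) := by
  unfold collectA
  suffices H : ∀ (acc : List APos),
      (sps.foldl (fun acc sp =>
        let sp' := PySem.Chars.strip sp.toList
        findLoopA t sp' (t.length + 1) (PySem.Chars.find t sp') acc) acc).map toPair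
      = acc.map toPair ++ sps.flatMap (fun sp =>
        let sp' := PySem.Chars.strip sp.toList
        occsB t sp' (t.length + 1) (PySem.Chars.find t sp') []) by
    simpa using H []
  induction sps with
  | nil => intro acc; simp
  | cons sp sps ih =>
    intro acc
    simp only [List.foldl_cons, List.flatMap_cons]
    rw [ih, findLoopA_occsB, occsB_acc]
    simp

theorem map_insertBy (x : APos) (ys : List APos) :
    (PySem.List.insertBy (fun a b => decide (a.start < b.start)) x ys).map toPair
      = PySem.List.insertBy (fun a b => decide (a.1 < b.1)) (toPair x) (ys.map toPair) := by
  induction ys with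
  | nil => rfl
  | cons y ys ih =>
    simp only [PySem.List.insertBy, List.map_cons]
    by_cases h : x.start < y.start
    · simp [toPair, h]
    · simp [toPair, h, ih]

theorem sorted_map_toPair (xs : List APos) :
    (PySem.List.sorted xs (fun p => p.start) false).map toPair
      = PySem.List.sorted (xs.map toPair) (fun iv => iv.1) false := by
  simp only [PySem.List.sorted, if_neg (by decide : ¬ (false = true))]
  suffices H : ∀ (acc : List APos),
      (xs.foldl (fun acc x => PySem.List.insertBy (fun a b => decide (a.start < b.start)) x acc) acc).map toPair
      = (xs.map toPair).foldl (fun acc x => PySem.List.insertBy (fun a b => decide (a.1 < b.1)) x acc) (acc.map toPair) by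
    simpa using H []
  induction xs with
  | nil => intro acc; rfl
  | cons x xs ih =>
    intro acc
    simp only [List.foldl_cons, List.map_cons]
    rw [ih, map_insertBy]

-- A's combin_array as structural recursion on the remaining suffix
def mergeA : List APos → APos → List APos
  | [], t => [t]
  | n :: rest, t =>
    if n.start ≤ t.end_ then mergeA rest ⟨t.start, max n.end_ t.end_⟩
    else t :: mergeA rest n

theorem combinArray_eq_mergeA (steps : List APos) :
    ∀ (p : Nat) (target : APos), combinArray steps p target = mergeA (steps.drop (p+1)) target := by
  suffices H : ∀ (k p : Nat) (target : APos), steps.length - p ≤ k →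
      combinArray steps p target = mergeA (steps.drop (p+1)) target by
    exact fun p target => H steps.length p target (by omega)
  intro k
  induction k with
  | zero =>
    intro p target hk
    have h1 : ¬ p + 1 = steps.length := by omega
    have h2 : steps[p+1]? = none := by rw [List.getElem?_eq_none_iff]; omega
    unfold combinArray
    rw [if_neg h1, List.drop_eq_nil_of_le (by omega : steps.length ≤ p + 1)]
    split
    · rfl
    · rename_i next heq
      rw [h2] at heq
      simp at heq
  | succ n ih =>
    intro p target hk
    unfold combinArray
    by_cases h1 : p + 1 = steps.length
    · rw [if_pos h1, List.drop_eq_nil_of_le (by omega)]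
      rfl
    · rw [if_neg h1]
      split
      · rename_i heq
        have : steps.length ≤ p + 1 := by
          have := List.getElem?_eq_none_iff.mp heq; omega
        rw [List.drop_eq_nil_of_le this]
        rfl
      · rename_i next heq
        have hlt : p + 1 < steps.length := (List.getElem?_eq_some_iff.mp heq).1
        have hdrop : steps.drop (p+1) = next :: steps.drop (p+2) := by
          rw [List.drop_eq_getElem_cons hlt]
          obtain ⟨h, hnext⟩ := List.getElem?_eq_some_iff.mp heq
          rw [hnext]
        rw [hdrop]
        simp only [mergeA]
        split
        · exact ih (p+1) _ (by omega)
        · rw [ih (p+1) _ (by omega)]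

theorem mergeA_ne_nil : ∀ (rest : List APos) (tg : APos), mergeA rest tg ≠ [] := by
  intro rest
  induction rest with
  | nil => intro tg; simp [mergeA]
  | cons n rest ih =>
    intro tg
    simp only [mergeA]
    split
    · exact ih _
    · simp

-- B's iterative merge, as the same structural recursion on pairs
def mergeP : List (Int × Int) → (Int × Int) → List (Int × Int)
  | [], c => [c]
  | n :: rest, c =>
    if n.1 ≤ c.2 then mergeP rest (c.1, max n.2 c.2)
    else c :: mergeP rest n

theorem mergeA_map (rest : List APos) : ∀ (tg : APos),
    (mergeA rest tg).map toPair = mergeP (rest.map toPair) (toPair tg) := by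
  induction rest with
  | nil => intro tg; rfl
  | cons n rest ih =>
    intro tg
    simp only [mergeA, List.map_cons, mergeP, toPair]
    split
    · rw [ih]; rfl
    · rw [List.map_cons, ih]; rfl

theorem foldl_mergeP (rest : List (Int × Int)) :
    ∀ (acc : List (Int × Int)) (c : Int × Int),
      (rest.foldl (fun (acc : List (Int × Int) × (Int × Int)) iv =>
        if iv.1 ≤ acc.2.2 then (acc.1, (acc.2.1, max acc.2.2 iv.2))
        else (acc.1 ++ [acc.2], iv)) (acc, c)).1
      ++ [(rest.foldl (fun (acc : List (Int × Int) × (Int × Int)) iv =>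
        if iv.1 ≤ acc.2.2 then (acc.1, (acc.2.1, max acc.2.2 iv.2))
        else (acc.1 ++ [acc.2], iv)) (acc, c)).2]
      = acc ++ mergeP rest c := by
  induction rest with
  | nil => intro acc c; rfl
  | cons n rest ih =>
    intro acc c
    simp only [List.foldl_cons, mergeP]
    by_cases h : n.1 ≤ c.2
    · rw [if_pos h, if_pos h, max_comm c.2 n.2, ih]
    · rw [if_neg h, if_neg h, ih]
      simp

-- the rendered output as a recursion over merged intervals
def renderR (t : List Char) : Int → List (Int × Int) → List Char
  | b, [] => PySem.Chars.slice t (some b) none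
  | b, c :: ms =>
    PySem.Chars.slice t (some b) (some c.1) ++ "<strong>".toList ++
    PySem.Chars.slice t (some c.1) (some c.2) ++ "</strong>".toList ++ renderR t c.2 ms

theorem slice_to_length (t : List Char) (b : Int) :
    PySem.List.slice t (some b) (some (t.length : Int)) = PySem.List.slice t (some b) none := by
  simp [PySem.List.slice, PySem.List.clampIdx]
  split_ifs <;> omega

theorem outA_render (t : List Char) (ms : List APos) :
    ∀ (b : Int) (acc : List (List Char)),
      ((ms.foldl (fun (st : List (List Char) × Int) i =>
        (st.1 ++ [PySem.Chars.slice t (some st.2) (some i.start), "<strong>".toList,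
                  PySem.Chars.slice t (some i.start) (some i.end_), "</strong>".toList],
         i.end_)) (acc, b)).1
       ++ [PySem.Chars.slice t (some (ms.foldl (fun (st : List (List Char) × Int) i =>
        (st.1 ++ [PySem.Chars.slice t (some st.2) (some i.start), "<strong>".toList,
                  PySem.Chars.slice t (some i.start) (some i.end_), "</strong>".toList],
         i.end_)) (acc, b)).2) (some (t.length : Int))]).flatten
      = acc.flatten ++ renderR t b (ms.map toPair) := by
  induction ms with
  | nil =>
    intro b acc
    simp [renderR, slice_to_length]
  | cons m ms ih =>
    intro b acc
    simp only [List.foldl_cons, List.map_cons]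
    rw [ih]
    simp [renderR, toPair]

theorem outB_render (t : List Char) (rest : List (Int × Int)) :
    ∀ (c : Int × Int) (b : Int),
      ((b :: (((c :: rest).dropLast).map (fun iv => iv.2))).zip (c :: rest)).flatMap (fun bi =>
        PySem.Chars.slice t (some bi.1) (some bi.2.1) ++ "<strong>".toList ++
        PySem.Chars.slice t (some bi.2.1) (some bi.2.2) ++ "</strong>".toList)
      ++ PySem.Chars.slice t (some (((c :: rest).getLast?.getD ((0 : Int), (0 : Int))).2)) none
      = renderR t b (c :: rest) := by
  induction rest with
  | nil => intro c b; simp [renderR]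
  | cons c' rest ih =>
    intro c b
    rw [show (c :: c' :: rest).dropLast = c :: (c' :: rest).dropLast from rfl]
    have h := ih c' c.2
    simp only [List.map_cons, List.zip_cons_cons, List.flatMap_cons, List.getLast?_cons_cons,
      List.append_assoc] at h ⊢
    rw [h]
    simp [renderR, List.append_assoc]

theorem highlight_eq (text : String) (sps : List String) :
    highlight_processer text sps = highlight_processer_alt text sps := by
  simp only [highlight_processer, highlight_processer_alt]
  rw [← collectA_flatMap, ← sorted_map_toPair]
  by_cases h0 : (collectA text.toList sps).length = 0
  · rw [if_pos h0]
    rw [List.length_eq_zero_iff.mp h0]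
    rfl
  · rw [if_neg h0]
    cases hres : PySem.List.sorted (collectA text.toList sps) (fun p => p.start) false with
    | nil =>
      have hnil : collectA text.toList sps = [] :=
        (PySem.List.sorted_eq_nil_iff _ _ _).mp hres
      exact absurd (by rw [hnil]; rfl) h0
    | cons r0 rs =>
      simp only [List.map_cons, List.headD_cons]
      rw [combinArray_eq_mergeA, List.drop_one, List.tail_cons]
      rw [foldl_mergeP, List.nil_append, ← mergeA_map]
      cases hmg : mergeA rs r0 with
      | nil => exact absurd hmg (mergeA_ne_nil rs r0)
      | cons m0 ms =>
        simp only [List.map_cons]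
        rw [outB_render text.toList (ms.map toPair) (toPair m0) 0]
        have hA := outA_render text.toList (m0 :: ms) 0 []
        simp only [List.flatten_nil, List.nil_append, List.map_cons] at hA
        rw [hA]

-- ===== VERDICT (by name: the statement is the Claim_ definition above) =====
theorem highlight_processer_spec : Claim_equal_highlight_processer := by
  intro text sps _
  unfold Spec_highlight_processer
  exact highlight_eq text sps
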